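-- pv_equiv track=rewrite | github.com/paulkarayan/melodic-interpreter | core/validator.py | extract_notes_from_chord
-- ===== SOURCE A (Python) =====
-- from typing import List, Set, Tuple
--
-- def extract_notes_from_chord(chord_notation: str) -> List[str]:
--     """
--     Extract individual notes from ABC chord notation [ABC]
--
--     Args:
--         chord_notation: ABC chord like "[EA]" or "[Adf]"
--
--     Returns:
--         List of note names
--     """
--     # Remove brackets
--     clean = chord_notation.strip('[]')
--
--     # Extract note letters (with sharps/flats)
--     notes = []
--     i = 0
--     while i < len(clean):
--         note = clean[i]
--         # Check for sharp/flat
--         if i + 1 < len(clean) and clean[i + 1] in ['^', '_', '=']: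
--             note += '#' if clean[i + 1] == '^' else 'b'
--             i += 2
--         else:
--             i += 1
--         notes.append(note)
--
--     return notes
-- ===== SOURCE B (Python) =====
-- import re
--
-- def extract_notes_from_chord(chord_notation: str):
--     """Extract individual notes from ABC chord notation [ABC] (regex tokenization)."""
--     clean = chord_notation.strip('[]')
--     pairs = re.findall(r'(.)([\^_=])?', clean, re.DOTALL)
--     return [ch + ('#' if acc == '^' else 'b') if acc else ch for ch, acc in pairs]
-- ===== Notes on version B (the rewrite author's own statement) =====
-- stated objective: idiomatic
-- what changed: Replaces the manual index-advancing while-loop by a regex tokenization: re.findall(r'(.)([\^_=])?', clean, re.DOTALL) yields (char, optional-accidental) pairs which a comprehension maps to tokens.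
import Mathlib
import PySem

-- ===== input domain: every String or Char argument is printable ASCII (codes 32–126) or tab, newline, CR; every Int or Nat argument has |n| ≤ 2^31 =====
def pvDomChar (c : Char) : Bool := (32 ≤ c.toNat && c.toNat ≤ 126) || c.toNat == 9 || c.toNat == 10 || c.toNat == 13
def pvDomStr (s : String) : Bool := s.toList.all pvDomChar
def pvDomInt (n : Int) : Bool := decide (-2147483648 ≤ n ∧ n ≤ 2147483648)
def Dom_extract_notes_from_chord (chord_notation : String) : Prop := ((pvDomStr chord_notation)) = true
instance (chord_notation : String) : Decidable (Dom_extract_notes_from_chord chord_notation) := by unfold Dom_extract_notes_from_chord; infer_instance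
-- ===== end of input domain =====

-- B replaces A's index-advancing while-loop by a regex tokenization into (char, optional-accidental)
-- pairs mapped to tokens (objective: idiomatic); same return value, no side effects.

-- ===== PORT A =====
-- A's manual while-loop over the cleaned string, index i, accumulator notes.
def pvLoopA (clean : List Char) (i : Nat) (notes : List String) : List String :=
  if _h : i < clean.length then
    let c := clean.getD i ' '
    if i + 1 < clean.length ∧ (clean.getD (i+1) ' ' = '^' ∨ clean.getD (i+1) ' ' = '_' ∨ clean.getD (i+1) ' ' = '=') then
      pvLoopA clean (i + 2) (notes ++ [String.ofList [c, if clean.getD (i+1) ' ' = '^' then '#' else 'b']])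
    else
      pvLoopA clean (i + 1) (notes ++ [String.ofList [c]])
  else notes
termination_by clean.length - i

def extract_notes_from_chord (chord_notation : String) : List String :=
  pvLoopA (PySem.Str.stripChars chord_notation "[]").toList 0 []

-- ===== PORT B =====
-- the regex r'(.)([\^_=])?' : each match is one char plus an optional accidental; structural
-- recursion on the char list is the exact semantics of findall for this pattern (with DOTALL).
def pvTok : List Char → List (Char × Option Char)
  | [] => []
  | c :: a :: rest =>
      if a = '^' ∨ a = '_' ∨ a = '=' then (c, some a) :: pvTok rest
      else (c, none) :: pvTok (a :: rest)
  | [c] => [(c, none)]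

def pvEmit : Char × Option Char → String
  | (c, some a) => String.ofList [c, if a = '^' then '#' else 'b']
  | (c, none)   => String.ofList [c]

def extract_notes_from_chord_alt (chord_notation : String) : List String :=
  (pvTok (PySem.Str.stripChars chord_notation "[]").toList).map pvEmit

-- ===== PRECONDITION & SPEC =====
def Spec_extract_notes_from_chord (chord_notation : String) (out : List String) : Prop := out = extract_notes_from_chord_alt chord_notation
instance (chord_notation : String) (out : List String) : Decidable (Spec_extract_notes_from_chord chord_notation out) := by unfold Spec_extract_notes_from_chord; infer_instance

-- ===== CLAIM (what is proved, stated in full; the proofs are below) =====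
def Claim_equal_extract_notes_from_chord : Prop := ∀ (chord_notation : String), Dom_extract_notes_from_chord chord_notation → Spec_extract_notes_from_chord chord_notation (extract_notes_from_chord chord_notation)

-- ===== LEMMAS AND PROOFS =====
lemma pvLoopA_eq (clean : List Char) (i : Nat) (notes : List String) :
    pvLoopA clean i notes = notes ++ (pvTok (clean.drop i)).map pvEmit := by
  fun_induction pvLoopA clean i notes with
  | case1 i notes h c hacc ih =>
      obtain ⟨h1, hacc⟩ := hacc
      have e1 : clean.drop i = clean.getD i ' ' :: clean.drop (i+1) := by
        rw [List.drop_eq_getElem_cons h]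
        simp [List.getD_eq_getElem?_getD, List.getElem?_eq_getElem h]
      have e2 : clean.drop (i+1) = clean.getD (i+1) ' ' :: clean.drop (i+2) := by
        rw [List.drop_eq_getElem_cons h1]
        simp [List.getD_eq_getElem?_getD, List.getElem?_eq_getElem h1]
      rw [e1, e2]
      simp only [pvTok, if_pos hacc, List.map_cons, pvEmit]
      rw [show notes ++ (String.ofList [clean.getD i ' ', if clean.getD (i+1) ' ' = '^' then '#' else 'b'] :: List.map pvEmit (pvTok (clean.drop (i+2)))) = (notes ++ [String.ofList [clean.getD i ' ', if clean.getD (i+1) ' ' = '^' then '#' else 'b']]) ++ List.map pvEmit (pvTok (clean.drop (i+2))) by simp]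
      exact ih
  | case2 i notes h c hacc ih =>
      have e1 : clean.drop i = clean.getD i ' ' :: clean.drop (i+1) := by
        rw [List.drop_eq_getElem_cons h]
        simp [List.getD_eq_getElem?_getD, List.getElem?_eq_getElem h]
      by_cases h1 : i + 1 < clean.length
      · have e2 : clean.drop (i+1) = clean.getD (i+1) ' ' :: clean.drop (i+2) := by
          rw [List.drop_eq_getElem_cons h1]
          simp [List.getD_eq_getElem?_getD, List.getElem?_eq_getElem h1]
        have hna : ¬ (clean.getD (i+1) ' ' = '^' ∨ clean.getD (i+1) ' ' = '_' ∨ clean.getD (i+1) ' ' = '=') :=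
          fun hc => hacc ⟨h1, hc⟩
        rw [e1, e2]
        simp only [pvTok, if_neg hna, List.map_cons, pvEmit]
        rw [← e2]
        rw [show notes ++ (String.ofList [clean.getD i ' '] :: List.map pvEmit (pvTok (clean.drop (i+1)))) = (notes ++ [String.ofList [clean.getD i ' ']]) ++ List.map pvEmit (pvTok (clean.drop (i+1))) by simp]
        exact ih
      · have hd1 : clean.drop (i+1) = [] := List.drop_eq_nil_of_le (by omega)
        rw [e1, hd1]
        rw [hd1] at ih
        simp only [pvTok, List.map_cons, List.map_nil, pvEmit] at ih ⊢
        simpa using ih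
  | case3 i notes h =>
      rw [List.drop_eq_nil_of_le (by omega : clean.length ≤ i)]
      simp [pvTok]

-- ===== VERDICT (by name: the statement is the Claim_ definition above) =====
theorem extract_notes_from_chord_spec : Claim_equal_extract_notes_from_chord := by
  intro s _
  unfold Spec_extract_notes_from_chord extract_notes_from_chord extract_notes_from_chord_alt
  simpa using pvLoopA_eq (PySem.Str.stripChars s "[]").toList 0 []
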